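-- pv_equiv track=rewrite | github.com/shreyasrami/Unicode-Django | mytasks/binary.py | check_binary
-- ===== SOURCE A (Python) =====
-- def check_binary(num1,num2):
--     result = {}
--     for num in range(num1,num2):
--         temp = 0
--         binlist = list(bin(num)[2:])
--         for digit in binlist:
--             if digit == '1' and digit == temp:
--                 result[num] = True
--                 break
--             temp = digit
--         else:
--             result[num] = False
--     return result
-- ===== SOURCE B (Python) =====
-- def check_binary(num1, num2):
--     # Per number: adjacent set bits iff a & (a >> 1) is nonzero (on the magnitude,
--     # which is what bin(num)[2:] exposes), replacing A's per-digit string scan.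
--     return {num: (abs(num) & (abs(num) >> 1)) != 0 for num in range(num1, num2)}
-- ===== Notes on version B (the rewrite author's own statement) =====
-- stated objective: faster
-- what changed: Replaces the per-number conversion to a binary string and character scan with a single bit-twiddling test (a & (a>>1)) != 0 on the magnitude, built as a dict comprehension.
import Mathlib
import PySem

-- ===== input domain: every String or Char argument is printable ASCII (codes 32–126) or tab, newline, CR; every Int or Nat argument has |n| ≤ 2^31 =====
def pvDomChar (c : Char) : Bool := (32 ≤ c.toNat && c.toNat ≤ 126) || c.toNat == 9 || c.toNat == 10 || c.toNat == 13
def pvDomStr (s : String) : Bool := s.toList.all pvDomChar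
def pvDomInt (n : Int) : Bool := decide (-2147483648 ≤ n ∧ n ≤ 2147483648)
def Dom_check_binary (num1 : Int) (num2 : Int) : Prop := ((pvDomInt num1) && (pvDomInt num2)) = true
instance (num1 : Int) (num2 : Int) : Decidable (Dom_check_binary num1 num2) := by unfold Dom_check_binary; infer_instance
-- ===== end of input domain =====

-- B replaces A's per-number binary-string character scan with the bit test (a &&& (a >>> 1)) ≠ 0 (objective: faster, constant-factor).

-- ===== PORT A =====
-- binary digits of n, least significant first (helper for the hand port of bin(num)[2:])
def binCharsRev (n : Nat) : List Char :=
  if n = 0 then [] else (if n % 2 = 1 then '1' else '0') :: binCharsRev (n / 2)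

-- exact port of list(bin(num)[2:]): '0' for 0, MSB-first digits for positive,
-- and for negative num the 'b' of '-0b…' survives the [2:] slice
def pyBinDrop2 (num : Int) : List Char :=
  if num < 0 then 'b' :: (binCharsRev num.natAbs).reverse
  else if num = 0 then ['0']
  else (binCharsRev num.natAbs).reverse

-- A's inner for/else loop with `temp` (initially the int 0, which no char equals → none) and break
def innerLoop (temp : Option Char) : List Char → Bool
  | [] => false
  | d :: rest => if d = '1' ∧ some d = temp then true else innerLoop (some d) rest

def check_binary (num1 : Int) (num2 : Int) : List (Int × Bool) :=
  ((PySem.List.pyRange num1 num2 1).foldl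
    (fun result num => result.insert num (innerLoop none (pyBinDrop2 num)))
    (PySem.Dict.ofList [])).items

-- ===== PORT B =====
def check_binary_alt (num1 : Int) (num2 : Int) : List (Int × Bool) :=
  ((PySem.List.pyRange num1 num2 1).foldl
    (fun result num =>
      let a := num.natAbs
      result.insert num (decide (a &&& (a >>> 1) ≠ 0)))
    (PySem.Dict.ofList [])).items

-- ===== PRECONDITION & SPEC =====
def Spec_check_binary (num1 : Int) (num2 : Int) (out : List (Int × Bool)) : Prop := out = check_binary_alt num1 num2
instance (num1 : Int) (num2 : Int) (out : List (Int × Bool)) : Decidable (Spec_check_binary num1 num2 out) := by unfold Spec_check_binary; infer_instance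

-- ===== CLAIM (what is proved, stated in full; the proofs are below) =====
def Claim_equal_check_binary : Prop := ∀ (num1 : Int) (num2 : Int), Dom_check_binary num1 num2 → Spec_check_binary num1 num2 (check_binary num1 num2)

-- ===== LEMMAS AND PROOFS =====

-- the j-th binary digit (LSB-first) is '1' exactly when bit j of n is set
lemma binCharsRev_getElem? (n : Nat) : ∀ j : Nat, ((binCharsRev n)[j]? = some '1') ↔ n.testBit j := by
  induction n using Nat.strong_induction_on with
  | _ n ih =>
    intro j
    rw [binCharsRev]
    by_cases h0 : n = 0
    · simp [h0]
    · rw [if_neg h0]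
      cases j with
      | zero =>
        rw [Nat.testBit_zero]
        by_cases hm : n % 2 = 1
        · simp [hm]
        · rw [if_neg hm]
          simp [hm]
      | succ j =>
        simp only [List.getElem?_cons_succ]
        rw [ih (n / 2) (Nat.div_lt_self (Nat.pos_of_ne_zero h0) (by norm_num)) j]
        rw [Nat.testBit_add_one]

-- A's scan with a non-'1' carried digit behaves like a fresh scan
lemma innerLoop_of_ne (temp : Option Char) (h : temp ≠ some '1') (l : List Char) :
    innerLoop temp l = innerLoop none l := by
  cases l with
  | nil => rfl
  | cons d rest =>
    simp only [innerLoop]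
    have : ¬ (d = '1' ∧ some d = temp) := by rintro ⟨rfl, h2⟩; exact h h2.symm
    have h2 : ¬ (d = '1' ∧ some d = none) := by rintro ⟨_, h3⟩; cases h3
    rw [if_neg this, if_neg h2]

-- A's scan finds a pair of consecutive '1's (with the carried digit as index −1)
lemma innerLoop_iff (l : List Char) : ∀ temp : Option Char,
    innerLoop temp l = true ↔
      ((temp = some '1' ∧ l[0]? = some '1') ∨ ∃ j, l[j]? = some '1' ∧ l[j+1]? = some '1') := by
  induction l with
  | nil => intro temp; simp [innerLoop]
  | cons d rest ih =>
    intro temp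
    simp only [innerLoop]
    by_cases hc : d = '1' ∧ some d = temp
    · rw [if_pos hc]
      simp only [true_iff]
      obtain ⟨hd, ht⟩ := hc
      subst hd
      exact Or.inl ⟨ht.symm, by simp⟩
    · rw [if_neg hc, ih]
      constructor
      · rintro (⟨hd, h0⟩ | ⟨j, h1, h2⟩)
        · exact Or.inr ⟨0, by simpa using hd, by simpa using h0⟩
        · exact Or.inr ⟨j + 1, by simpa using h1, by simpa using h2⟩
      · rintro (⟨ht, h0⟩ | ⟨j, h1, h2⟩)
        · exact absurd ⟨by simpa using h0, by rw [show d = '1' by simpa using h0]; exact ht.symm⟩ hc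
        · cases j with
          | zero =>
            exact Or.inl ⟨by simpa using h1, by simpa using h2⟩
          | succ j =>
            exact Or.inr ⟨j, by simpa using h1, by simpa using h2⟩

-- adjacency is invariant under reversal
lemma adj_reverse (l : List Char) :
    (∃ j, (l.reverse)[j]? = some '1' ∧ (l.reverse)[j+1]? = some '1') ↔
      (∃ j, l[j]? = some '1' ∧ l[j+1]? = some '1') := by
  constructor
  · rintro ⟨j, h1, h2⟩
    obtain ⟨hj1, -⟩ := List.getElem?_eq_some_iff.mp h2
    simp only [List.length_reverse] at hj1
    refine ⟨l.length - 2 - j, ?_, ?_⟩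
    · rw [List.getElem?_reverse (by omega)] at h2
      convert h2 using 2; omega
    · rw [List.getElem?_reverse (by omega)] at h1
      convert h1 using 2; omega
  · rintro ⟨j, h1, h2⟩
    obtain ⟨hj1, -⟩ := List.getElem?_eq_some_iff.mp h2
    refine ⟨l.length - 2 - j, ?_, ?_⟩
    · rw [List.getElem?_reverse (by omega)]
      convert h2 using 2; omega
    · rw [List.getElem?_reverse (by omega)]
      convert h1 using 2; omega

-- the bit test finds a pair of consecutive set bits
lemma land_shift_iff (n : Nat) :
    (n &&& (n >>> 1) ≠ 0) ↔ ∃ j, n.testBit j ∧ n.testBit (j + 1) := by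
  constructor
  · intro h
    obtain ⟨j, hj⟩ := Nat.exists_most_significant_bit h
    have hb := hj.1
    rw [Nat.testBit_and, Nat.testBit_shiftRight] at hb
    simp only [Bool.and_eq_true] at hb
    exact ⟨j, hb.1, by simpa [Nat.add_comm] using hb.2⟩
  · rintro ⟨j, h1, h2⟩ h0
    have : (n &&& (n >>> 1)).testBit j = false := by rw [h0]; exact Nat.zero_testBit j
    rw [Nat.testBit_and, Nat.testBit_shiftRight, Nat.add_comm] at this
    rw [h1, h2] at this
    exact Bool.noConfusion this

-- per-number core lemma for a natural number's digit list
lemma scan_eq_bits (n : Nat) :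
    innerLoop none ((binCharsRev n).reverse) = decide (n &&& (n >>> 1) ≠ 0) := by
  rw [Bool.eq_iff_iff, decide_eq_true_eq, innerLoop_iff, land_shift_iff, adj_reverse]
  constructor
  · rintro (⟨h, _⟩ | ⟨j, h1, h2⟩)
    · simp at h
    · exact ⟨j, (binCharsRev_getElem? n j).mp h1, (binCharsRev_getElem? n (j+1)).mp h2⟩
  · rintro ⟨j, h1, h2⟩
    exact Or.inr ⟨j, (binCharsRev_getElem? n j).mpr h1, (binCharsRev_getElem? n (j+1)).mpr h2⟩

-- per-number lemma over Int, including the 'b' head for negatives and the 0 case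
lemma per_num (num : Int) :
    innerLoop none (pyBinDrop2 num) = decide (num.natAbs &&& (num.natAbs >>> 1) ≠ 0) := by
  unfold pyBinDrop2
  by_cases hneg : num < 0
  · rw [if_pos hneg]
    show innerLoop none ('b' :: _) = _
    rw [show innerLoop none ('b' :: (binCharsRev num.natAbs).reverse)
          = innerLoop (some 'b') ((binCharsRev num.natAbs).reverse) by
        simp [innerLoop]]
    rw [innerLoop_of_ne (some 'b') (by simp) _]
    exact scan_eq_bits num.natAbs
  · rw [if_neg hneg]
    by_cases h0 : num = 0
    · subst h0; decide
    · rw [if_neg h0]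
      exact scan_eq_bits num.natAbs

-- ===== VERDICT (by name: the statement is the Claim_ definition above) =====
theorem check_binary_spec : Claim_equal_check_binary := by
  intro num1 num2 _
  unfold Spec_check_binary check_binary check_binary_alt
  have hstep : (fun (result : PySem.Dict Int Bool) (num : Int) =>
        result.insert num (innerLoop none (pyBinDrop2 num)))
      = (fun (result : PySem.Dict Int Bool) (num : Int) =>
        let a := num.natAbs
        result.insert num (decide (a &&& (a >>> 1) ≠ 0))) := by
    funext r n
    rw [per_num]
  rw [hstep]
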